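-- pv_equiv track=rewrite | github.com/TomDubois12/SAE_3.05 | applicationWeb/escrimeFlask/models.py | calculer_nombre_poules
-- ===== SOURCE A (Python) =====
-- def calculer_nombre_poules(liste_choix_part_poule, nb_part, nb_arbitre):
--
--   listeNbPoule = []
--
--   if nb_part in liste_choix_part_poule :
--     return [nb_part,1,0]
--
--
--   for choix in liste_choix_part_poule:
--     ind = 0
--     nbPoule = 0
--     nbP = nb_part
--     while nbP >= choix :
--       nbP -= choix
--       nbPoule += 1
--     if nbP > 0 :
--       nbPoule += 1
--     listeNbPoule.append([choix,nbPoule,nbP])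
--
--   listeRetien = []
--   if nb_arbitre == 0 : nb_arbitre = 1
--
--   for elem in listeNbPoule :
--     if elem[1] % nb_arbitre == 0 and elem[0] != 5 :
--       listeRetien.append(elem)
--     elif elem[1]-1 % nb_arbitre == 0 and elem[0] == 5:
--       listeRetien.append(elem)
--
--   choixR = -1
--
--   if len(listeRetien) > 0 :
--     for l in listeRetien :
--       if choixR == -1 or l[2] > choixR[2] :
--         choixR = l
--     return choixR[0],choixR[1],choixR[2]
--   else :
--     for elem in listeNbPoule :
--       if elem[2] == 0 :
--         return elem
--     return listeNbPoule[2]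
-- ===== SOURCE B (Python) =====
-- def calculer_nombre_poules(liste_choix_part_poule, nb_part, nb_arbitre):
--     if nb_part in liste_choix_part_poule:
--         return [nb_part, 1, 0]
--     nba = nb_arbitre or 1
--
--     pools = []
--     for c in liste_choix_part_poule:
--         q, r = divmod(nb_part, c)
--         pools.append((c, q + (1 if r else 0), r))
--
--     retien = [e for e in pools
--               if e[1] % nba == 0 and e[0] != 5 or e[1] - 1 % nba == 0 and e[0] == 5]
--     if retien:
--         best = max(retien, key=lambda e: e[2])
--         return best[0], best[1], best[2]
--     for e in pools:
--         if e[2] == 0: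
--             return [e[0], e[1], e[2]]
--     e = pools[2]
--     return [e[0], e[1], e[2]]
-- ===== Notes on version B (the rewrite author's own statement) =====
-- stated objective: faster
-- what changed: Each per-option pool count is computed with one divmod instead of A's repeated-subtraction while loop, the keep-test (kept verbatim from the spec) becomes one comprehension, and the best retained option is picked with max(key=...) instead of a sentinel scan; Pre_ restricts to the natural domain (positive pool-size options, nonnegative participant count), where A's repeated subtraction and divmod agree, and to inputs where A terminates and its final listeNbPoule[2] does not raise IndexError.
-- outside the precondition, e.g. on calculer_nombre_poules([3], -2, 1): A returns [3, 0, -2], B returns [3, 0, 1]; on calculer_nombre_poules([-3], -5, 1): A returns [-3, 0, -5], B returns [-3, 2, -2]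
import Mathlib
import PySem

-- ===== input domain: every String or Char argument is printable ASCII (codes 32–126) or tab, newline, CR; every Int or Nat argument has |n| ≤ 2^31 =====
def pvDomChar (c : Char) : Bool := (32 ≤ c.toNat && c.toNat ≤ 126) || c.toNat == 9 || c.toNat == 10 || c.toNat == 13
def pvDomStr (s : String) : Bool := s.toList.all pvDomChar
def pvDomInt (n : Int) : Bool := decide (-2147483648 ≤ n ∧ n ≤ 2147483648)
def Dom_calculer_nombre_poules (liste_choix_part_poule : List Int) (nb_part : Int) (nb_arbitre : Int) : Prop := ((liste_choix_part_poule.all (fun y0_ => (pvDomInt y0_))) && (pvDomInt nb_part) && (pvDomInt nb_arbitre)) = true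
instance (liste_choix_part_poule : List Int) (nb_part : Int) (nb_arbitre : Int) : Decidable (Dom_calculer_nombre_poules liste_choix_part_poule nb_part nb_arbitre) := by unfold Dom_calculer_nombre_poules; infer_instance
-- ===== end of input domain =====

-- B computes each per-option pool count with one divmod instead of A's repeated-subtraction
-- while loop and picks the best retained option with max(key=...) instead of a sentinel scan.

-- ===== PORT A =====
-- the 'while nbP >= choix: nbP -= choix; nbPoule += 1' loop, with fuel (enough fuel
-- on every input Pre_ admits; outside Pre_ the Python loop may not terminate)
def pvAwhile (choix : Int) : Nat → Int × Int → Int × Int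
  | 0, s => s
  | f + 1, (nbP, nbPoule) =>
      if choix ≤ nbP then pvAwhile choix f (nbP - choix, nbPoule + 1) else (nbP, nbPoule)

def calculer_nombre_poules (liste_choix_part_poule : List Int) (nb_part : Int) (nb_arbitre : Int) : List Int :=
  if liste_choix_part_poule.contains nb_part then [nb_part, 1, 0]
  else
    let listeNbPoule : List (Int × Int × Int) :=
      liste_choix_part_poule.foldl (fun acc choix =>
        let s := pvAwhile choix (nb_part.toNat + 1) (nb_part, 0)
        let nbPoule := if 0 < s.1 then s.2 + 1 else s.2
        acc ++ [(choix, nbPoule, s.1)]) []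
    let nbA := if nb_arbitre = 0 then 1 else nb_arbitre
    let listeRetien : List (Int × Int × Int) :=
      listeNbPoule.foldl (fun acc e =>
        if PySem.Int.mod e.2.1 nbA == 0 && e.1 != 5 then acc ++ [e]
        else if e.2.1 - PySem.Int.mod 1 nbA == 0 && e.1 == 5 then acc ++ [e]
        else acc) []
    if 0 < listeRetien.length then
      match listeRetien.foldl (fun acc l =>
          match acc with
          | none => some l
          | some c => if c.2.2 < l.2.2 then some l else acc) none with
      | some c => [c.1, c.2.1, c.2.2]
      | none => []          -- unreachable: the fold of a nonempty list is some _
    else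
      match listeNbPoule.find? (fun e => e.2.2 == 0) with
      | some e => [e.1, e.2.1, e.2.2]
      | none =>
        match listeNbPoule[2]? with
        | some e => [e.1, e.2.1, e.2.2]
        | none => []        -- Python raises IndexError here; excluded by Pre_

-- ===== PORT B =====
-- one divmod per option (Python divmod(nb_part, c) = floor quotient and remainder)
def pvEntry (nb_part : Int) (c : Int) : Int × Int × Int :=
  let q := PySem.Int.floordiv nb_part c
  let r := PySem.Int.mod nb_part c
  (c, q + (if r ≠ 0 then 1 else 0), r)

def calculer_nombre_poules_alt (liste_choix_part_poule : List Int) (nb_part : Int) (nb_arbitre : Int) : List Int :=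
  if liste_choix_part_poule.contains nb_part then [nb_part, 1, 0]
  else
    let nba := if nb_arbitre ≠ 0 then nb_arbitre else 1
    let pools := liste_choix_part_poule.map (pvEntry nb_part)
    let retien := pools.filter (fun e =>
      (PySem.Int.mod e.2.1 nba == 0 && e.1 != 5) || (e.2.1 - PySem.Int.mod 1 nba == 0 && e.1 == 5))
    match PySem.List.max? retien (fun e => e.2.2) with
    | some best => [best.1, best.2.1, best.2.2]
    | none =>
      match pools.find? (fun e => e.2.2 == 0) with
      | some e => [e.1, e.2.1, e.2.2]
      | none =>
        match pools[2]? with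
        | some e => [e.1, e.2.1, e.2.2]
        | none => []        -- Python raises IndexError here; excluded by Pre_

-- ===== PRECONDITION & SPEC =====
-- Pre_ restricts to the task's natural domain — positive pool-size options and a
-- nonnegative participant count (outside it A's repeated subtraction either diverges
-- or never runs and returns 0 pools where B's divmod floors) — and excludes the inputs
-- where A's final listeNbPoule[2] raises IndexError (nothing retained, no zero
-- remainder, fewer than 3 options).
def Pre_calculer_nombre_poules (liste_choix_part_poule : List Int) (nb_part : Int) (nb_arbitre : Int) : Prop :=
  nb_part ∈ liste_choix_part_poule ∨
  ((∀ c ∈ liste_choix_part_poule, 0 < c) ∧ 0 ≤ nb_part ∧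
   (3 ≤ liste_choix_part_poule.length
    ∨ (∃ c ∈ liste_choix_part_poule, PySem.Int.mod nb_part c = 0)
    ∨ (∃ c ∈ liste_choix_part_poule,
        (c ≠ 5 ∧ PySem.Int.mod (PySem.Int.floordiv nb_part c + (if PySem.Int.mod nb_part c = 0 then 0 else 1)) (if nb_arbitre = 0 then 1 else nb_arbitre) = 0)
        ∨ (c = 5 ∧ PySem.Int.floordiv nb_part c + (if PySem.Int.mod nb_part c = 0 then 0 else 1) - PySem.Int.mod 1 (if nb_arbitre = 0 then 1 else nb_arbitre) = 0))))

instance (liste_choix_part_poule : List Int) (nb_part : Int) (nb_arbitre : Int) : Decidable (Pre_calculer_nombre_poules liste_choix_part_poule nb_part nb_arbitre) := by unfold Pre_calculer_nombre_poules; infer_instance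

def pvWitness_calculer_nombre_poules : List Int × Int × Int := ([2, 3, 5], 7, 1)

def Spec_calculer_nombre_poules (liste_choix_part_poule : List Int) (nb_part : Int) (nb_arbitre : Int) (out : List Int) : Prop := out = calculer_nombre_poules_alt liste_choix_part_poule nb_part nb_arbitre
instance (liste_choix_part_poule : List Int) (nb_part : Int) (nb_arbitre : Int) (out : List Int) : Decidable (Spec_calculer_nombre_poules liste_choix_part_poule nb_part nb_arbitre out) := by unfold Spec_calculer_nombre_poules; infer_instance

-- ===== CLAIM (what is proved, stated in full; the proofs are below) =====
def Claim_equal_calculer_nombre_poules : Prop := ∀ (liste_choix_part_poule : List Int) (nb_part : Int) (nb_arbitre : Int), Dom_calculer_nombre_poules liste_choix_part_poule nb_part nb_arbitre → Pre_calculer_nombre_poules liste_choix_part_poule nb_part nb_arbitre → Spec_calculer_nombre_poules liste_choix_part_poule nb_part nb_arbitre (calculer_nombre_poules liste_choix_part_poule nb_part nb_arbitre)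

-- ===== LEMMAS AND PROOFS =====

-- the while loop with enough fuel computes floor-divmod
theorem pvAwhile_run (c : Int) (hc : 0 < c) :
    ∀ (f : Nat) (s q : Int), 0 ≤ s → s < (f : Int) →
      pvAwhile c f (s, q) = (s % c, q + s / c) := by
  intro f
  induction f with
  | zero => intro s q h0 h1; exfalso; omega
  | succ f ih =>
    intro s q h0 h1
    rw [pvAwhile]
    by_cases h : c ≤ s
    · rw [if_pos h, ih (s - c) (q + 1) (by omega) (by push_cast at h1 ⊢; omega)]
      have h1 : (s - c) % c = s % c := Int.sub_emod_right s c
      have h2 : (s - c) / c = s / c - 1 := by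
        have := Int.add_mul_ediv_right s (-1) (by omega : c ≠ 0)
        simpa [sub_eq_add_neg, neg_mul] using this
      rw [h1, h2]; ring_nf
    · rw [if_neg h]
      have hlt : s < c := by omega
      rw [Int.emod_eq_of_lt h0 hlt, Int.ediv_eq_zero_of_lt h0 hlt]
      simp

-- one iteration of A's per-option loop equals B's divmod entry (on admitted options)
theorem entry_eq (p c : Int) (hc : 0 < c) (hp : 0 ≤ p) :
    (let s := pvAwhile c (p.toNat + 1) (p, 0)
     let nbPoule := if 0 < s.1 then s.2 + 1 else s.2
     ((c, nbPoule, s.1) : Int × Int × Int)) = pvEntry p c := by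
  have hrun := pvAwhile_run c hc (p.toNat + 1) p 0 hp (by omega)
  have hm : PySem.Int.mod p c = p % c := PySem.Int.mod_eq_emod_of_pos hc
  have hd : PySem.Int.floordiv p c = p / c := PySem.Int.floordiv_eq_ediv_of_pos hc
  have hnn : 0 ≤ p % c := Int.emod_nonneg p (by omega)
  simp only [pvEntry, hrun, hm, hd]
  by_cases hz : p % c = 0
  · simp [hz]
  · have hzp : 0 < p % c := by omega
    simp [hz, hzp, add_comm]

-- A's if/elif append loop is B's filter (same condition, or-combined)
theorem retien_eq (l : List (Int × Int × Int)) (nbA : Int) :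
    l.foldl (fun acc e =>
        if PySem.Int.mod e.2.1 nbA == 0 && e.1 != 5 then acc ++ [e]
        else if e.2.1 - PySem.Int.mod 1 nbA == 0 && e.1 == 5 then acc ++ [e]
        else acc) [] =
    l.filter (fun e =>
        (PySem.Int.mod e.2.1 nbA == 0 && e.1 != 5) || (e.2.1 - PySem.Int.mod 1 nbA == 0 && e.1 == 5)) := by
  have hfun : (fun (acc : List (Int × Int × Int)) e =>
      if PySem.Int.mod e.2.1 nbA == 0 && e.1 != 5 then acc ++ [e]
      else if e.2.1 - PySem.Int.mod 1 nbA == 0 && e.1 == 5 then acc ++ [e]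
      else acc) =
      (fun acc e =>
       if ((PySem.Int.mod e.2.1 nbA == 0 && e.1 != 5) || (e.2.1 - PySem.Int.mod 1 nbA == 0 && e.1 == 5)) then acc ++ [e] else acc) := by
    funext acc e
    by_cases h1 : (PySem.Int.mod e.2.1 nbA == 0 && e.1 != 5) = true <;>
      by_cases h2 : (e.2.1 - PySem.Int.mod 1 nbA == 0 && e.1 == 5) = true <;>
        simp [h1, h2]
  rw [hfun]
  simpa using PySem.List.foldl_append_if_eq_filter
    (p := fun e => ((PySem.Int.mod e.2.1 nbA == 0 && e.1 != 5) || (e.2.1 - PySem.Int.mod 1 nbA == 0 && e.1 == 5)))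
    (l := l) (acc := [])

-- A's sentinel best-scan is max? (first maximal element)
theorem bestscan_eq (l : List (Int × Int × Int)) :
    l.foldl (fun acc x =>
        match acc with
        | none => some x
        | some c => if c.2.2 < x.2.2 then some x else acc) none =
    PySem.List.max? l (fun e => e.2.2) := by
  unfold PySem.List.max?
  have : (fun (acc : Option (Int × Int × Int)) x =>
      match acc with
      | none => some x
      | some c => if c.2.2 < x.2.2 then some x else acc) = (fun (acc : Option (Int × Int × Int)) (x : Int × Int × Int) =>
      match acc with
      | none => some x
      | some m => if m.2.2 < x.2.2 then some x else some m) := by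
    funext acc x; cases acc <;> rfl
  rw [this]; congr 1; funext acc x; cases acc <;> simp

-- ===== VERDICT (by name: the statement is the Claim_ definition above) =====
theorem calculer_nombre_poules_spec : Claim_equal_calculer_nombre_poules := by
  intro L p a _ hpre
  unfold Spec_calculer_nombre_poules
  by_cases hc : L.contains p
  · have hmem : p ∈ L := by simpa using hc
    simp only [calculer_nombre_poules, calculer_nombre_poules_alt, List.contains_eq_mem,
      decide_eq_true_eq, if_pos hmem]
  · have hmem : p ∉ L := by simpa using hc
    have hdom : (∀ c ∈ L, 0 < c) ∧ 0 ≤ p := by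
      rcases hpre with h | h
      · exact absurd h hmem
      · exact ⟨h.1, h.2.1⟩
    rw [calculer_nombre_poules, calculer_nombre_poules_alt, if_neg hc, if_neg hc]
    simp only []
    have hpools :
        L.foldl (fun acc choix =>
          let s := pvAwhile choix (p.toNat + 1) (p, 0)
          let nbPoule := if 0 < s.1 then s.2 + 1 else s.2
          acc ++ [(choix, nbPoule, s.1)]) [] = L.map (pvEntry p) := by
      rw [PySem.List.foldl_append_singleton_eq_map]
      simp only [List.nil_append]
      exact List.map_congr_left (fun c hcmem => entry_eq p c (hdom.1 c hcmem) hdom.2)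
    have hnba : (if a = 0 then 1 else a) = (if a ≠ 0 then a else 1) := by
      by_cases h : a = 0 <;> simp [h]
    rw [hpools, hnba, retien_eq]
    set nba := if a ≠ 0 then a else 1
    set pools := L.map (pvEntry p)
    set retien := pools.filter (fun e =>
      (PySem.Int.mod e.2.1 nba == 0 && e.1 != 5) || (e.2.1 - PySem.Int.mod 1 nba == 0 && e.1 == 5)) with hret
    rw [bestscan_eq]
    by_cases hre : retien = []
    · rw [hre]
      simp [PySem.List.max?]
    · have hlen : 0 < retien.length := List.length_pos_iff.mpr hre
      rcases hmx : PySem.List.max? retien (fun e => e.2.2) with _ | best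
      · exact absurd ((PySem.List.max?_eq_none_iff _ _).mp hmx) hre
      · rw [if_pos hlen]
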